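-- pv_equiv track=rewrite | github.com/SingSongZepe/Nleetcode | lc1574_py/main.py | findLengthOfShortestSubarray
-- ===== SOURCE A (Python) =====
-- from typing import List
--
-- def findLengthOfShortestSubarray(arr: List[int]) -> int:
--     right = len(arr) - 1
--     while right > 0 and arr[right] >= arr[right - 1]:
--         right -= 1
--
--     ret = right
--     left = 0
--     while left < right and (left == 0 or arr[left - 1] <= arr[left]):
--         # find next valid number after arr[left]
--         while right < len(arr) and arr[left] > arr[right]:
--             right += 1
--         # save length of removed subarray
--         ret = min(ret, right - left - 1)
--         left += 1
--     return ret
-- ===== SOURCE B (Python) =====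
-- def findLengthOfShortestSubarray(arr):
--     n = len(arr)
--     # start of the longest non-decreasing suffix
--     r0 = n - 1
--     while r0 > 0 and arr[r0 - 1] <= arr[r0]:
--         r0 -= 1
--     if r0 <= 0:
--         return 0  # already sorted (or empty)
--     best = r0  # remove the whole block before the suffix
--     i = 0
--     # for each index i of the non-decreasing prefix, binary-search the sorted
--     # suffix arr[r0:] for the first element >= arr[i]
--     while i < r0 and (i == 0 or arr[i - 1] <= arr[i]):
--         lo, hi = r0, n
--         while lo < hi:
--             mid = (lo + hi) // 2
--             if arr[mid] < arr[i]:
--                 lo = mid + 1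
--             else:
--                 hi = mid
--         best = min(best, lo - i - 1)
--         i += 1
--     return best
-- ===== Notes on version B (the rewrite author's own statement) =====
-- stated objective: alternative
-- what changed: B drops A's shared moving suffix pointer (two-pointer merge): it precomputes the suffix start, and for each prefix index runs an independent binary search over the sorted suffix for the first element that fits, so no pointer state is carried between outer iterations.
-- intended difference: On the empty list A returns -1 (leftover of right = len(arr)-1), but the shortest subarray to remove from an empty, already-sorted array has length 0, which B returns. — e.g. on findLengthOfShortestSubarray([]): A returns -1, B returns 0
import Mathlib
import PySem

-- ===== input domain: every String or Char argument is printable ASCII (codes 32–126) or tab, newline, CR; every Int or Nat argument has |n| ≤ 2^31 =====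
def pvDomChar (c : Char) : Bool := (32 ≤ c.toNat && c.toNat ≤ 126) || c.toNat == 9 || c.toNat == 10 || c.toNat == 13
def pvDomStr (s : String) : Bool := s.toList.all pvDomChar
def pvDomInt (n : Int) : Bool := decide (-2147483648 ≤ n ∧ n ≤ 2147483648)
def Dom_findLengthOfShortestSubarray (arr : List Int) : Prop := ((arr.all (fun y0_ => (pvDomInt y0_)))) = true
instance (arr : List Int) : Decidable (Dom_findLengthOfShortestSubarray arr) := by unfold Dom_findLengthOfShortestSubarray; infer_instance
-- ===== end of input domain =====

-- B replaces A's shared moving suffix pointer (two-pointer merge) by an independent binary search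
-- over the sorted suffix for each prefix index (alternative decomposition); on [] A returns -1
-- (stated D_), B returns 0. Ports are literal fuel-recursions of their Pythons.


-- ===== PORT A =====
-- Loops are ported as structural recursions on a Nat fuel that is provably sufficient (the fuel-0
-- branch is never reached at the fuels the ports pass); all list accesses are in range whenever
-- executed (the guards ensure it), so getD with default 0 is exact for Python's arr[..] here.

-- while right > 0 and arr[right] >= arr[right - 1]: right -= 1
def aFindRight (arr : List Int) : Nat → Int → Int
  | 0, right => right
  | fuel + 1, right =>
      if right > 0 ∧ arr.getD right.toNat 0 ≥ arr.getD (right - 1).toNat 0 then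
        aFindRight arr fuel (right - 1)
      else right

-- inner: while right < len(arr) and arr[left] > arr[right]: right += 1
def aAdvance (arr : List Int) : Nat → Int → Int → Int
  | 0, _, right => right
  | fuel + 1, left, right =>
      if right < (arr.length : Int) ∧ arr.getD left.toNat 0 > arr.getD right.toNat 0 then
        aAdvance arr fuel left (right + 1)
      else right

-- outer loop of A, state (ret, right, left)
def aLoop (arr : List Int) : Nat → Int → Int → Int → Int
  | 0, ret, _, _ => ret
  | fuel + 1, ret, right, left =>
      if left < right ∧ (left = 0 ∨ arr.getD (left - 1).toNat 0 ≤ arr.getD left.toNat 0) then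
        let r' := aAdvance arr arr.length left right
        aLoop arr fuel (min ret (r' - left - 1)) r' (left + 1)
      else ret

def findLengthOfShortestSubarray (arr : List Int) : Int :=
  let right := aFindRight arr arr.length ((arr.length : Int) - 1)
  aLoop arr (arr.length + 1) right right 0

-- ===== PORT B =====
-- while r0 > 0 and arr[r0 - 1] <= arr[r0]: r0 -= 1
def bFindR (arr : List Int) : Nat → Int → Int
  | 0, r0 => r0
  | fuel + 1, r0 =>
      if r0 > 0 ∧ arr.getD (r0 - 1).toNat 0 ≤ arr.getD r0.toNat 0 then
        bFindR arr fuel (r0 - 1)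
      else r0

-- while lo < hi: mid = (lo+hi)//2; if arr[mid] < v: lo = mid+1 else hi = mid
def bSearch (arr : List Int) (v : Int) : Nat → Int → Int → Int
  | 0, lo, _ => lo
  | fuel + 1, lo, hi =>
      if lo < hi then
        let mid := PySem.Int.floordiv (lo + hi) 2
        if arr.getD mid.toNat 0 < v then bSearch arr v fuel (mid + 1) hi
        else bSearch arr v fuel lo mid
      else lo

-- outer loop of B, state (best, i); one fresh binary search per prefix index
def bOuter (arr : List Int) (r0 : Int) : Nat → Int → Int → Int
  | 0, best, _ => best
  | fuel + 1, best, i =>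
      if i < r0 ∧ (i = 0 ∨ arr.getD (i - 1).toNat 0 ≤ arr.getD i.toNat 0) then
        let lo := bSearch arr (arr.getD i.toNat 0) arr.length r0 (arr.length : Int)
        bOuter arr r0 fuel (min best (lo - i - 1)) (i + 1)
      else best

def findLengthOfShortestSubarray_alt (arr : List Int) : Int :=
  let n : Int := (arr.length : Int)
  let r0 := bFindR arr arr.length (n - 1)
  if r0 ≤ 0 then 0
  else bOuter arr r0 arr.length r0 0

-- ===== PRECONDITION & SPEC =====
-- On the empty list A returns -1 (leftover of right = len(arr)-1); the length of the shortest
-- subarray to remove from an already-sorted empty array is 0, which B returns.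
def D_findLengthOfShortestSubarray (arr : List Int) : Prop := arr = []
instance (arr : List Int) : Decidable (D_findLengthOfShortestSubarray arr) := by unfold D_findLengthOfShortestSubarray; infer_instance

def Spec_findLengthOfShortestSubarray (arr : List Int) (out : Int) : Prop := ¬ D_findLengthOfShortestSubarray arr → out = findLengthOfShortestSubarray_alt arr
instance (arr : List Int) (out : Int) : Decidable (Spec_findLengthOfShortestSubarray arr out) := by unfold Spec_findLengthOfShortestSubarray; infer_instance

def pvDiffWitness_findLengthOfShortestSubarray : List Int := []
def pvDiffWitnessOut_findLengthOfShortestSubarray : Int × Int := (-1, 0)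

-- ===== CLAIM =====
def Claim_unchanged_findLengthOfShortestSubarray : Prop := ∀ (arr : List Int), Dom_findLengthOfShortestSubarray arr → Spec_findLengthOfShortestSubarray arr (findLengthOfShortestSubarray arr)
def Claim_changed_findLengthOfShortestSubarray : Prop := Dom_findLengthOfShortestSubarray (pvDiffWitness_findLengthOfShortestSubarray) ∧ D_findLengthOfShortestSubarray (pvDiffWitness_findLengthOfShortestSubarray) ∧ findLengthOfShortestSubarray (pvDiffWitness_findLengthOfShortestSubarray) = pvDiffWitnessOut_findLengthOfShortestSubarray.1 ∧ findLengthOfShortestSubarray_alt (pvDiffWitness_findLengthOfShortestSubarray) = pvDiffWitnessOut_findLengthOfShortestSubarray.2 ∧ pvDiffWitnessOut_findLengthOfShortestSubarray.1 ≠ pvDiffWitnessOut_findLengthOfShortestSubarray.2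
def Claim_exact_findLengthOfShortestSubarray : Prop := ∀ (arr : List Int), Dom_findLengthOfShortestSubarray arr → D_findLengthOfShortestSubarray arr → findLengthOfShortestSubarray arr ≠ findLengthOfShortestSubarray_alt arr

-- ===== LEMMAS AND PROOFS =====

theorem aLoop_stop (arr : List Int) (f : Nat) (ret r l : Int)
    (h : ¬ (l < r ∧ (l = 0 ∨ arr.getD (l - 1).toNat 0 ≤ arr.getD l.toNat 0))) :
    aLoop arr f ret r l = ret := by
  cases f with
  | zero => rfl
  | succ f => rw [aLoop, if_neg h]

theorem bFindR_eq_aFindRight (arr : List Int) :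
    ∀ (f : Nat) (r : Int), bFindR arr f r = aFindRight arr f r := by
  intro f
  induction f with
  | zero => intro r; rfl
  | succ f ih =>
      intro r
      rw [bFindR, aFindRight]
      by_cases h : r > 0 ∧ arr.getD (r - 1).toNat 0 ≤ arr.getD r.toNat 0
      · rw [if_pos h, if_pos (⟨h.1, h.2⟩ : _ ∧ _)]; exact ih (r - 1)
      · rw [if_neg h, if_neg (fun hc => h ⟨hc.1, hc.2⟩)]

theorem aFindRight_nonneg (arr : List Int) :
    ∀ (f : Nat) (r : Int), 0 ≤ r → 0 ≤ aFindRight arr f r := by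
  intro f
  induction f with
  | zero => intro r hr; exact hr
  | succ f ih =>
      intro r hr
      rw [aFindRight]
      split_ifs with h
      · exact ih (r - 1) (by omega)
      · exact hr

theorem aFindRight_le (arr : List Int) :
    ∀ (f : Nat) (r : Int), aFindRight arr f r ≤ r := by
  intro f
  induction f with
  | zero => intro r; rw [aFindRight]
  | succ f ih =>
      intro r
      rw [aFindRight]
      split_ifs with h
      · have := ih (r - 1); omega
      · omega

theorem aFindRight_stop (arr : List Int) :
    ∀ (f : Nat) (r : Int), r.toNat ≤ f →
      ¬ (aFindRight arr f r > 0 ∧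
         arr.getD (aFindRight arr f r).toNat 0 ≥ arr.getD (aFindRight arr f r - 1).toNat 0) := by
  intro f
  induction f with
  | zero => intro r hr; rw [aFindRight]; intro hc; omega
  | succ f ih =>
      intro r hr
      rw [aFindRight]
      split_ifs with h
      · exact ih (r - 1) (by omega)
      · exact h

-- the suffix found by A's first loop is adjacent-sorted
theorem aFindRight_adj (arr : List Int) :
    ∀ (f : Nat) (r : Int), r ≤ (arr.length : Int) - 1 →
      (∀ k : Int, r ≤ k → k < (arr.length : Int) - 1 →
        arr.getD k.toNat 0 ≤ arr.getD (k + 1).toNat 0) →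
      ∀ k : Int, aFindRight arr f r ≤ k → k < (arr.length : Int) - 1 →
        arr.getD k.toNat 0 ≤ arr.getD (k + 1).toNat 0 := by
  intro f
  induction f with
  | zero => intro r _ hP; rw [aFindRight]; exact hP
  | succ f ih =>
      intro r hr hP
      rw [aFindRight]
      split_ifs with h
      · apply ih (r - 1) (by omega)
        intro k hk1 hk2
        by_cases hke : k = r - 1
        · have he2 : (r - 1 + 1) = r := by omega
          rw [hke, he2]
          exact h.2
        · exact hP k (by omega) hk2
      · exact hP

-- chain adjacency into full sortedness on the suffix
theorem sorted_chain (arr : List Int) (r0 : Int)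
    (hadj : ∀ k : Int, r0 ≤ k → k < (arr.length : Int) - 1 →
      arr.getD k.toNat 0 ≤ arr.getD (k + 1).toNat 0) :
    ∀ (d : Nat) (a b : Int), r0 ≤ a → a ≤ b → b ≤ (arr.length : Int) - 1 →
      (b - a).toNat ≤ d → arr.getD a.toNat 0 ≤ arr.getD b.toNat 0 := by
  intro d
  induction d with
  | zero =>
      intro a b h1 h2 h3 hd
      have : a = b := by omega
      rw [this]
  | succ d ih =>
      intro a b h1 h2 h3 hd
      by_cases he : a = b
      · rw [he]
      · have h4 : arr.getD a.toNat 0 ≤ arr.getD (a + 1).toNat 0 := hadj a h1 (by omega)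
        have h5 := ih (a + 1) b (by omega) (by omega) h3 (by omega)
        omega

-- characterization of A's inner scan: first index ≥ r with arr[k] ≥ v, else n
theorem aAdvance_spec (arr : List Int) (l : Int) :
    ∀ (f : Nat) (r : Int), 0 ≤ r → r ≤ (arr.length : Int) →
      ((arr.length : Int) - r).toNat ≤ f →
      (r ≤ aAdvance arr f l r ∧ aAdvance arr f l r ≤ (arr.length : Int) ∧
       (∀ k : Int, r ≤ k → k < aAdvance arr f l r →
          arr.getD k.toNat 0 < arr.getD l.toNat 0) ∧
       (aAdvance arr f l r < (arr.length : Int) →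
          arr.getD l.toNat 0 ≤ arr.getD (aAdvance arr f l r).toNat 0)) := by
  intro f
  induction f with
  | zero =>
      intro r h0 hn hf
      have : r = (arr.length : Int) := by omega
      rw [aAdvance]
      exact ⟨le_refl _, by omega, fun k hk1 hk2 => by omega, by omega⟩
  | succ f ih =>
      intro r h0 hn hf
      rw [aAdvance]
      split_ifs with h
      · obtain ⟨i1, i2, i3, i4⟩ := ih (r + 1) (by omega) (by omega) (by omega)
        refine ⟨by omega, i2, ?_, i4⟩
        intro k hk1 hk2
        by_cases hke : k = r
        · rw [hke]; omega
        · exact i3 k (by omega) hk2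
      · refine ⟨le_refl _, hn, fun k hk1 hk2 => by omega, ?_⟩
        intro hlt
        omega

-- characterization of B's binary search (needs the suffix sorted)
theorem bSearch_spec (arr : List Int) (r0 v : Int) (_hr0 : 0 ≤ r0)
    (hsort : ∀ a b : Int, r0 ≤ a → a ≤ b → b ≤ (arr.length : Int) - 1 →
      arr.getD a.toNat 0 ≤ arr.getD b.toNat 0) :
    ∀ (f : Nat) (lo hi : Int), r0 ≤ lo → lo ≤ hi → hi ≤ (arr.length : Int) →
      (hi - lo).toNat ≤ f →
      (∀ k : Int, r0 ≤ k → k < lo → arr.getD k.toNat 0 < v) →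
      (∀ k : Int, hi ≤ k → k < (arr.length : Int) → v ≤ arr.getD k.toNat 0) →
      (r0 ≤ bSearch arr v f lo hi ∧ bSearch arr v f lo hi ≤ (arr.length : Int) ∧
       (∀ k : Int, r0 ≤ k → k < bSearch arr v f lo hi → arr.getD k.toNat 0 < v) ∧
       (bSearch arr v f lo hi < (arr.length : Int) →
          v ≤ arr.getD (bSearch arr v f lo hi).toNat 0)) := by
  intro f
  induction f with
  | zero =>
      intro lo hi h1 h2 h3 hf hlow hhigh
      have : lo = hi := by omega
      rw [bSearch]
      exact ⟨h1, by omega, hlow, fun hlt => hhigh lo (by omega) hlt⟩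
  | succ f ih =>
      intro lo hi h1 h2 h3 hf hlow hhigh
      rw [bSearch]
      split_ifs with hlh
      · have hmidlt : PySem.Int.floordiv (lo + hi) 2 < hi := by
          rw [PySem.Int.floordiv_eq_ediv_of_pos (by omega)]
          omega
        have hmidge : lo ≤ PySem.Int.floordiv (lo + hi) 2 := by
          rw [PySem.Int.floordiv_eq_ediv_of_pos (by omega)]
          omega
        set mid := PySem.Int.floordiv (lo + hi) 2 with hmiddef
        by_cases hc : arr.getD mid.toNat 0 < v
        · rw [if_pos hc]
          apply ih (mid + 1) hi (by omega) (by omega) h3 (by omega)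
          · intro k hk1 hk2
            by_cases hkl : k < lo
            · exact hlow k hk1 hkl
            · calc arr.getD k.toNat 0 ≤ arr.getD mid.toNat 0 :=
                    hsort k mid (by omega) (by omega) (by omega)
                _ < v := hc
          · exact hhigh
        · rw [if_neg hc]
          apply ih lo mid h1 (by omega) (by omega) (by omega) hlow
          intro k hk1 hk2
          by_cases hkh : hi ≤ k
          · exact hhigh k hkh hk2
          · calc v ≤ arr.getD mid.toNat 0 := by omega
              _ ≤ arr.getD k.toNat 0 := hsort mid k (by omega) (by omega) (by omega)
      · exact ⟨h1, by omega, hlow, fun hlt => hhigh lo (by omega) hlt⟩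

-- first-match positions are unique
theorem first_match_unique (arr : List Int) (r0 v j1 j2 : Int)
    (h1a : r0 ≤ j1) (h1b : j1 ≤ (arr.length : Int))
    (h1c : ∀ k : Int, r0 ≤ k → k < j1 → arr.getD k.toNat 0 < v)
    (h1d : j1 < (arr.length : Int) → v ≤ arr.getD j1.toNat 0)
    (h2a : r0 ≤ j2) (h2b : j2 ≤ (arr.length : Int))
    (h2c : ∀ k : Int, r0 ≤ k → k < j2 → arr.getD k.toNat 0 < v)
    (h2d : j2 < (arr.length : Int) → v ≤ arr.getD j2.toNat 0) : j1 = j2 := by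
  by_contra hne
  rcases lt_or_gt_of_ne hne with hlt | hlt
  · have := h2c j1 h1a hlt
    have := h1d (by omega)
    omega
  · have := h1c j2 h2a hlt
    have := h2d (by omega)
    omega

-- main loop correspondence: A's outer loop with shared pointer r equals B's outer loop,
-- under the invariant that everything in [r0, r) is below the previous prefix value
theorem outer_eq (arr : List Int) (r0 : Int) (hr0 : 1 ≤ r0)
    (hr0n : r0 ≤ (arr.length : Int) - 1)
    (hsort : ∀ a b : Int, r0 ≤ a → a ≤ b → b ≤ (arr.length : Int) - 1 →
      arr.getD a.toNat 0 ≤ arr.getD b.toNat 0)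
    (hbreak : arr.getD r0.toNat 0 < arr.getD (r0 - 1).toNat 0) :
    ∀ (fB fA : Nat) (i r best : Int),
      (r0 + 1 - i).toNat ≤ fA → (r0 + 1 - i).toNat ≤ fB →
      0 ≤ i → i ≤ r0 → r0 ≤ r → r ≤ (arr.length : Int) →
      ((i = 0 ∧ r = r0) ∨
       (1 ≤ i ∧ ∀ k : Int, r0 ≤ k → k < r →
          arr.getD k.toNat 0 < arr.getD (i - 1).toNat 0)) →
      aLoop arr fA best r i = bOuter arr r0 fB best i := by
  intro fB
  induction fB with
  | zero => intro fA i r best hfA hfB h0 hir0 hrr hrn hinv; omega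
  | succ fB ih =>
      intro fA i r best hfA hfB h0 hir0 hrr hrn hinv
      obtain ⟨fA', rfl⟩ : ∃ fA', fA = fA' + 1 := by
        cases fA with
        | zero => exact absurd hfA (by omega)
        | succ fA' => exact ⟨fA', rfl⟩
      by_cases hguard : i < r0 ∧ (i = 0 ∨ arr.getD (i - 1).toNat 0 ≤ arr.getD i.toNat 0)
      · -- both loops take a step
        rw [bOuter, if_pos hguard]
        rw [aLoop, if_pos ⟨by omega, hguard.2⟩]
        -- everything in [r0, r) is below arr[i]
        have hbelow : ∀ k : Int, r0 ≤ k → k < r →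
            arr.getD k.toNat 0 < arr.getD i.toNat 0 := by
          rcases hinv with ⟨_, hre⟩ | ⟨hi1, hk⟩
          · intro k hk1 hk2; omega
          · rcases hguard.2 with hi0 | hmono
            · omega
            · intro k hk1 hk2
              exact lt_of_lt_of_le (hk k hk1 hk2) hmono
        obtain ⟨a1, a2, a3, a4⟩ :=
          aAdvance_spec arr i arr.length r (by omega) hrn (by omega)
        obtain ⟨b1, b2, b3, b4⟩ :=
          bSearch_spec arr r0 (arr.getD i.toNat 0) (by omega) hsort arr.length
            r0 (arr.length : Int) (le_refl _) (by omega) (le_refl _) (by omega)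
            (fun k hk1 hk2 => by omega) (fun k hk1 hk2 => by omega)
        set j := aAdvance arr arr.length i r with hjdef
        set lo := bSearch arr (arr.getD i.toNat 0) arr.length r0 (arr.length : Int) with hlodef
        have hj3 : ∀ k : Int, r0 ≤ k → k < j → arr.getD k.toNat 0 < arr.getD i.toNat 0 := by
          intro k hk1 hk2
          by_cases hkr : k < r
          · exact hbelow k hk1 hkr
          · exact a3 k (by omega) hk2
        have hje : j = lo :=
          first_match_unique arr r0 (arr.getD i.toNat 0) j lo
            (by omega) a2 hj3 a4 b1 b2 b3 b4
        rw [hje]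
        apply ih fA' (i + 1) lo (min best (lo - i - 1)) (by omega) (by omega)
          (by omega) (by omega) b1 b2
        right
        refine ⟨by omega, ?_⟩
        intro k hk1 hk2
        have he : (i + 1 - 1) = i := by omega
        rw [he]
        exact b3 k hk1 hk2
      · -- both loops stop here
        rw [bOuter, if_neg hguard]
        apply aLoop_stop
        rintro ⟨hlr, hg2⟩
        by_cases hie : i < r0
        · exact hguard ⟨hie, hg2⟩
        · -- i = r0: A's prefix check fails because arr[r0-1] > arr[r0]
          have hieq : i = r0 := by omega
          rcases hg2 with hi0 | hmono
          · omega
          · rw [hieq] at hmono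
            omega

theorem main_eq (arr : List Int) (hne : arr ≠ []) :
    findLengthOfShortestSubarray arr = findLengthOfShortestSubarray_alt arr := by
  have hn : 1 ≤ (arr.length : Int) := by
    have : arr.length ≠ 0 := fun h => hne (List.eq_nil_of_length_eq_zero h)
    omega
  have hr : bFindR arr arr.length ((arr.length : Int) - 1)
      = aFindRight arr arr.length ((arr.length : Int) - 1) :=
    bFindR_eq_aFindRight arr arr.length ((arr.length : Int) - 1)
  show aLoop arr (arr.length + 1) (aFindRight arr arr.length ((arr.length : Int) - 1))
        (aFindRight arr arr.length ((arr.length : Int) - 1)) 0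
      = if bFindR arr arr.length ((arr.length : Int) - 1) ≤ 0 then 0
        else bOuter arr (bFindR arr arr.length ((arr.length : Int) - 1)) arr.length
          (bFindR arr arr.length ((arr.length : Int) - 1)) 0
  rw [hr]
  set r0 : Int := aFindRight arr arr.length ((arr.length : Int) - 1) with hr0def
  have hr0nn : 0 ≤ r0 := aFindRight_nonneg arr arr.length ((arr.length : Int) - 1) (by omega)
  have hr0le : r0 ≤ (arr.length : Int) - 1 := aFindRight_le arr arr.length ((arr.length : Int) - 1)
  by_cases hz : r0 ≤ 0
  · rw [if_pos hz]
    have : r0 = 0 := by omega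
    rw [this, aLoop_stop arr _ _ _ _ (by omega)]
  · rw [if_neg hz]
    have hadj : ∀ k : Int, r0 ≤ k → k < (arr.length : Int) - 1 →
        arr.getD k.toNat 0 ≤ arr.getD (k + 1).toNat 0 :=
      aFindRight_adj arr arr.length ((arr.length : Int) - 1) (by omega)
        (fun k hk1 hk2 => by omega)
    have hsort : ∀ a b : Int, r0 ≤ a → a ≤ b → b ≤ (arr.length : Int) - 1 →
        arr.getD a.toNat 0 ≤ arr.getD b.toNat 0 :=
      fun a b h1 h2 h3 => sorted_chain arr r0 hadj arr.length a b h1 h2 h3 (by omega)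
    have hstop := aFindRight_stop arr arr.length ((arr.length : Int) - 1) (by omega)
    rw [← hr0def] at hstop
    have hbreak : arr.getD r0.toNat 0 < arr.getD (r0 - 1).toNat 0 := by
      by_contra hc
      exact hstop ⟨by omega, by omega⟩
    exact outer_eq arr r0 (by omega) hr0le hsort hbreak arr.length (arr.length + 1)
      0 r0 r0 (by omega) (by omega) (le_refl 0) (by omega) (le_refl r0) (by omega)
      (Or.inl ⟨rfl, rfl⟩)

-- ===== VERDICT =====
theorem findLengthOfShortestSubarray_spec : Claim_unchanged_findLengthOfShortestSubarray := by
  intro arr _ hD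
  exact main_eq arr hD

theorem findLengthOfShortestSubarray_changed : Claim_changed_findLengthOfShortestSubarray := by
  unfold Claim_changed_findLengthOfShortestSubarray
  exact ⟨by decide, rfl, by decide, by decide, by decide⟩

theorem findLengthOfShortestSubarray_tight : Claim_exact_findLengthOfShortestSubarray := by
  intro arr _ hD
  rw [hD]
  decide
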